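-- pv_equiv track=rewrite | github.com/belindamef/my_master_project | code/tests_O2_Omega_generators.py | distinct_permutations
-- ===== SOURCE A (Python) =====
-- def distinct_permutations(iterable, n_nodes):
--     """
--     Generate distinct permutations of a subset of an iterable.
--     """
--     def generate(permutation):
--         if len(permutation) == n_nodes:
--             yield permutation
--         else:
--             seen = set()  # Set to keep track of permutations already generated
--             for i, element in enumerate(iterable):
--                 if element not in seen:
--                     seen.add(element)
--                     yield from generate(permutation + [element])
--
--     yield from generate([])
-- ===== SOURCE B (Python) =====
-- def distinct_permutations(iterable, n_nodes):
--     """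
--     Generate distinct permutations of a subset of an iterable.
--     (B: flat iterative product over the first-occurrence-deduplicated values,
--     instead of A's per-level generator recursion.)
--     """
--     vals = list(dict.fromkeys(iterable))
--     results = [[]]
--     for _ in range(n_nodes):
--         results = [r + [v] for r in results for v in vals]
--     yield from results
-- ===== Notes on version B (the rewrite author's own statement) =====
-- stated objective: simpler
-- what changed: Replaces A's per-level recursive generator with a seen-set at every level by a single first-occurrence dedup followed by a flat iterative Cartesian-product loop (one list rebuild per level).
-- outside the precondition, e.g. on distinct_permutations([], -1): A returns [], B returns [[]]; on distinct_permutations([1], -1): A raises RecursionError, B returns [[]]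
import Mathlib
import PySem

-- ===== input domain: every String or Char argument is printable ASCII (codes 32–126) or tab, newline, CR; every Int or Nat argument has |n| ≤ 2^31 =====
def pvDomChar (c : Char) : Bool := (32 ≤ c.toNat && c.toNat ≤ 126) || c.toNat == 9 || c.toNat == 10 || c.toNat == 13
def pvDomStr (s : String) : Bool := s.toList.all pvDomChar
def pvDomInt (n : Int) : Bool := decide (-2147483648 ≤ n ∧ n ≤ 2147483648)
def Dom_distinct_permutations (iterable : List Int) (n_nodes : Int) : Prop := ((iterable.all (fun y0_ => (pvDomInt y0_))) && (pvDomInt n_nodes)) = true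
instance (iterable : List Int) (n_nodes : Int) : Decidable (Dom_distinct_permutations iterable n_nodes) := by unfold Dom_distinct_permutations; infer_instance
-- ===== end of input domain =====

-- B replaces A's per-level recursive generator (seen-set rebuilt at every level) by one
-- first-occurrence dedup followed by a flat iterative Cartesian-product loop (simpler, same output).


-- ===== PORT A =====
-- A's inner 'generate': recursion on remaining depth (fuel = n_nodes - len(permutation),
-- a guard that only makes the recursion total; on Pre_ it is never exhausted early).
-- The per-level loop keeps a Python 'seen' set and concatenates the yields.
def pvGenA (iterable : List Int) (n_nodes : Int) : Nat → List Int → List (List Int)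
  | 0, perm => if (perm.length : Int) = n_nodes then [perm] else []
  | fuel+1, perm =>
    if (perm.length : Int) = n_nodes then [perm]
    else
      (iterable.foldl
        (fun (st : PySem.Set Int × List (List Int)) e =>
          if PySem.Set.contains st.1 e then st
          else (PySem.Set.add st.1 e, st.2 ++ pvGenA iterable n_nodes fuel (perm ++ [e])))
        ((PySem.Set.empty : PySem.Set Int), ([] : List (List Int)))).2

def distinct_permutations (iterable : List Int) (n_nodes : Int) : List (List Int) :=
  pvGenA iterable n_nodes n_nodes.toNat []

-- ===== PORT B =====
-- vals = list(dict.fromkeys(iterable)); then n_nodes product-building passes over 'results'.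
def distinct_permutations_alt (iterable : List Int) (n_nodes : Int) : List (List Int) :=
  let vals := PySem.List.dedup iterable
  (List.range n_nodes.toNat).foldl
    (fun results _ => results.flatMap (fun r => vals.map (fun v => r ++ [v])))
    [[]]

-- ===== PRECONDITION & SPEC =====
-- Pre_ excludes negative n_nodes (outside the function's natural domain): there A recurses
-- without bound (RecursionError) on any nonempty iterable, and on the empty iterable its
-- empty stream vs B's [[]] is an accidental corner no caller specifies.
def Pre_distinct_permutations (iterable : List Int) (n_nodes : Int) : Prop := 0 ≤ n_nodes
instance (iterable : List Int) (n_nodes : Int) : Decidable (Pre_distinct_permutations iterable n_nodes) := by unfold Pre_distinct_permutations; infer_instance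
def pvWitness_distinct_permutations : List Int × Int := ([1, 2, 1], 2)

def Spec_distinct_permutations (iterable : List Int) (n_nodes : Int) (out : List (List Int)) : Prop := out = distinct_permutations_alt iterable n_nodes
instance (iterable : List Int) (n_nodes : Int) (out : List (List Int)) : Decidable (Spec_distinct_permutations iterable n_nodes out) := by unfold Spec_distinct_permutations; infer_instance

-- ===== CLAIM (what is proved, stated in full; the proofs are below) =====
def Claim_equal_distinct_permutations : Prop := ∀ (iterable : List Int) (n_nodes : Int), Dom_distinct_permutations iterable n_nodes → Pre_distinct_permutations iterable n_nodes → Spec_distinct_permutations iterable n_nodes (distinct_permutations iterable n_nodes)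

-- ===== LEMMAS AND PROOFS =====

-- first-occurrence dedup of `it` relative to an already-seen set `s`
def pvDedupFrom (s : PySem.Set Int) : List Int → List Int
  | [] => []
  | e :: rest =>
    if PySem.Set.contains s e then pvDedupFrom s rest
    else e :: pvDedupFrom (PySem.Set.add s e) rest

-- the full product of length m over vals, first position varying slowest (A's order)
def pvQ (vals : List Int) : Nat → List (List Int)
  | 0 => [[]]
  | m+1 => vals.flatMap (fun e => (pvQ vals m).map (e :: ·))

theorem pvDedupFrom_spec : ∀ (it : List Int) (s : PySem.Set Int),
    s ++ pvDedupFrom s it = it.foldl PySem.Set.add s := by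
  intro it
  induction it with
  | nil => intro s; simp [pvDedupFrom]
  | cons e rest ih =>
    intro s
    by_cases h : e ∈ s
    · have hadd : PySem.Set.add s e = s := by simp [PySem.Set.add, h]
      simp only [pvDedupFrom, List.foldl_cons, hadd]
      rw [if_pos ((PySem.Set.contains_iff s e).mpr h)]
      exact ih s
    · have hadd : PySem.Set.add s e = s ++ [e] := by simp [PySem.Set.add, h]
      simp only [pvDedupFrom, List.foldl_cons]
      rw [if_neg (fun hc => h ((PySem.Set.contains_iff s e).mp hc)), ← ih (PySem.Set.add s e),
        hadd]
      simp

theorem pvFold_dedup (f : Int → List (List Int)) :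
    ∀ (it : List Int) (s : PySem.Set Int) (acc : List (List Int)),
    (it.foldl (fun (st : PySem.Set Int × List (List Int)) e =>
        if PySem.Set.contains st.1 e then st
        else (PySem.Set.add st.1 e, st.2 ++ f e)) (s, acc)).2
      = acc ++ (pvDedupFrom s it).flatMap f := by
  intro it
  induction it with
  | nil => intro s acc; simp [pvDedupFrom]
  | cons e rest ih =>
    intro s acc
    by_cases h : e ∈ s
    · have hc : PySem.Set.contains s e = true := (PySem.Set.contains_iff s e).mpr h
      simp only [pvDedupFrom, List.foldl_cons, hc, if_true]
      exact ih s acc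
    · have hc : ¬ PySem.Set.contains s e = true := fun hc => h ((PySem.Set.contains_iff s e).mp hc)
      simp only [pvDedupFrom, List.foldl_cons, if_neg hc]
      rw [ih (PySem.Set.add s e) (acc ++ f e)]
      simp

theorem pvQ_step (vals : List Int) : ∀ m,
    pvQ vals (m+1) = (pvQ vals m).flatMap (fun r => vals.map (fun v => r ++ [v])) := by
  intro m
  induction m with
  | zero =>
    show List.flatMap _ vals = _
    induction vals with
    | nil => simp
    | cons v vs ihv => simpa [pvQ] using ihv
  | succ m ih =>
    show pvQ vals (m+2) = _
    calc pvQ vals (m+2)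
        = vals.flatMap (fun e => (pvQ vals (m+1)).map (e :: ·)) := rfl
      _ = vals.flatMap (fun e =>
            ((pvQ vals m).flatMap (fun r => vals.map (fun v => r ++ [v]))).map (e :: ·)) := by
            rw [ih]
      _ = (pvQ vals (m+1)).flatMap (fun r => vals.map (fun v => r ++ [v])) := by
            simp only [pvQ, List.flatMap_assoc, List.map_flatMap, List.flatMap_map,
              List.map_map, Function.comp_def, List.cons_append]

theorem pvGenA_eq (iterable : List Int) (n_nodes : Int) :
    ∀ (m : Nat) (perm : List Int), (perm.length : Int) + m = n_nodes →
    pvGenA iterable n_nodes m perm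
      = (pvQ (PySem.List.dedup iterable) m).map (perm ++ ·) := by
  intro m
  induction m with
  | zero =>
    intro perm hlen
    have : (perm.length : Int) = n_nodes := by omega
    simp [pvGenA, this, pvQ]
  | succ m ih =>
    intro perm hlen
    have hne : ¬ ((perm.length : Int) = n_nodes) := by omega
    have hded : pvDedupFrom PySem.Set.empty iterable = PySem.List.dedup iterable := by
      have := pvDedupFrom_spec iterable PySem.Set.empty
      simpa [PySem.Set.empty, PySem.List.dedup_eq_ofList, PySem.Set.ofList_eq_foldl] using this
    rw [show pvGenA iterable n_nodes (m+1) perm =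
        if (perm.length : Int) = n_nodes then [perm]
        else (iterable.foldl
          (fun (st : PySem.Set Int × List (List Int)) e =>
            if PySem.Set.contains st.1 e then st
            else (PySem.Set.add st.1 e, st.2 ++ pvGenA iterable n_nodes m (perm ++ [e])))
          ((PySem.Set.empty : PySem.Set Int), ([] : List (List Int)))).2 from rfl]
    rw [if_neg hne, pvFold_dedup (fun e => pvGenA iterable n_nodes m (perm ++ [e])), hded]
    have hcall : ∀ e, pvGenA iterable n_nodes m (perm ++ [e])
        = (pvQ (PySem.List.dedup iterable) m).map ((perm ++ [e]) ++ ·) := by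
      intro e; apply ih; simp; omega
    simp only [hcall]
    simp [pvQ, List.map_flatMap, List.map_map, Function.comp_def]

theorem pvAlt_eq (iterable : List Int) : ∀ (k : Nat),
    (List.range k).foldl
      (fun results _ => results.flatMap
        (fun r => (PySem.List.dedup iterable).map (fun v => r ++ [v]))) [[]]
      = pvQ (PySem.List.dedup iterable) k := by
  intro k
  induction k with
  | zero => simp [pvQ]
  | succ k ih => rw [List.range_succ, List.foldl_append, ih, List.foldl_cons, List.foldl_nil,
      ← pvQ_step]

-- ===== VERDICT (by name: the statement is the Claim_ definition above) =====
theorem distinct_permutations_spec : Claim_equal_distinct_permutations := by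
  intro iterable n_nodes _hdom hpre
  unfold Spec_distinct_permutations distinct_permutations distinct_permutations_alt
  have h0 : ((([] : List Int)).length : Int) + (n_nodes.toNat : Int) = n_nodes := by
    simpa using Int.toNat_of_nonneg hpre
  rw [pvGenA_eq iterable n_nodes n_nodes.toNat [] h0, pvAlt_eq]
  simp
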